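-- pv_equiv track=rewrite | github.com/emanbareket/Immanuel_Bareket_Projects | Klotski_Solver.py | board_to_int
-- ===== SOURCE A (Python) =====
-- def board_to_int(board):
--     hash_value = 0
--     multiplier = 1
--     for i in range(len(board)):
--         for j in range(len(board[i])):
--             hash_value += board[i][j]*multiplier
--             multiplier *= 10
--     return hash_value
-- ===== SOURCE B (Python) =====
-- def board_to_int(board):
--     # Horner's rule over the cells in reverse order: no multiplier variable.
--     hash_value = 0
--     for row in reversed(board):
--         for cell in reversed(row):
--             hash_value = hash_value * 10 + cell
--     return hash_value
-- ===== Notes on version B (the rewrite author's own statement) =====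
-- stated objective: simpler
-- what changed: Replaces the weighted sum with a separate multiplier variable by Horner's rule over the cells traversed in reverse, keeping a single accumulator.
import Mathlib
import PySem

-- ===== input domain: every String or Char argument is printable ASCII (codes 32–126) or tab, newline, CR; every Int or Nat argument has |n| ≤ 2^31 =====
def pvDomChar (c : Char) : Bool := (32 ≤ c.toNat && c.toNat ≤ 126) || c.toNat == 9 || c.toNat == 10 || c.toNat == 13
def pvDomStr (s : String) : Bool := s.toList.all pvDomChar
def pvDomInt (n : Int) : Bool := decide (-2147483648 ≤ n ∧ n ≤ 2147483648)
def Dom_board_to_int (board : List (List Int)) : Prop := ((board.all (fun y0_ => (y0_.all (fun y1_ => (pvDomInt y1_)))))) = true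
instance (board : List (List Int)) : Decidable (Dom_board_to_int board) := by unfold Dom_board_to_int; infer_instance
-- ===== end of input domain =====

-- B replaces A's weighted sum with a tracked multiplier by Horner's rule over the cells in reverse order (simpler).

-- ===== PORT A =====
-- nested loops accumulating (hash_value, multiplier)
def board_to_int (board : List (List Int)) : Int :=
  (board.foldl
    (fun s row => row.foldl (fun s x => (s.1 + x * s.2, s.2 * 10)) s)
    ((0 : Int), (1 : Int))).1

-- ===== PORT B =====
-- Horner's rule over reversed rows and reversed cells, single accumulator
def board_to_int_alt (board : List (List Int)) : Int :=
  board.reverse.foldl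
    (fun h row => row.reverse.foldl (fun h c => h * 10 + c) h)
    0

-- ===== PRECONDITION & SPEC =====
def Spec_board_to_int (board : List (List Int)) (out : Int) : Prop := out = board_to_int_alt board
instance (board : List (List Int)) (out : Int) : Decidable (Spec_board_to_int board out) := by unfold Spec_board_to_int; infer_instance

-- ===== CLAIM (what is proved, stated in full; the proofs are below) =====
def Claim_equal_board_to_int : Prop := ∀ (board : List (List Int)), Dom_board_to_int board → Spec_board_to_int board (board_to_int board)

-- ===== LEMMAS AND PROOFS =====

-- Horner step over a reversed list, from an arbitrary seed
theorem horner_rev_seed (l : List Int) (h : Int) :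
    l.reverse.foldl (fun h c => h * 10 + c) h
      = h * 10 ^ l.length + l.reverse.foldl (fun h c => h * 10 + c) 0 := by
  induction l generalizing h with
  | nil => simp
  | cons x t ih =>
      simp only [List.reverse_cons, List.foldl_append, List.foldl_cons, List.foldl_nil,
        List.length_cons]
      rw [ih h, ih 0]
      ring

-- A's fold over a flat list equals seed plus multiplier times the reverse-Horner value
theorem flat_fold_eq (l : List Int) (h m : Int) :
    (l.foldl (fun s x => (s.1 + x * s.2, s.2 * 10)) (h, m)).1
      = h + m * l.reverse.foldl (fun h c => h * 10 + c) 0 := by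
  induction l generalizing h m with
  | nil => simp
  | cons x t ih =>
      simp only [List.foldl_cons, List.reverse_cons, List.foldl_append, List.foldl_nil]
      rw [ih, horner_rev_seed]
      ring

-- collapse A's nested fold to the fold over the flattened board
theorem nestedA_eq_flat (board : List (List Int)) (s : Int × Int) :
    board.foldl (fun s row => row.foldl (fun s x => (s.1 + x * s.2, s.2 * 10)) s) s
      = (board.flatMap id).foldl (fun s x => (s.1 + x * s.2, s.2 * 10)) s := by
  induction board generalizing s with
  | nil => simp
  | cons r t ih => simp [List.foldl_append, ih]

-- collapse B's nested fold to the fold over the reversed flattened board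
theorem nestedB_eq_flat (board : List (List Int)) (h : Int) :
    board.reverse.foldl (fun h row => row.reverse.foldl (fun h c => h * 10 + c) h) h
      = (board.flatMap id).reverse.foldl (fun h c => h * 10 + c) h := by
  induction board generalizing h with
  | nil => simp
  | cons r t ih =>
      simp [List.foldl_append] at *
      simp [ih]

-- ===== VERDICT (by name: the statement is the Claim_ definition above) =====
theorem board_to_int_spec : Claim_equal_board_to_int := by
  intro board _
  unfold Spec_board_to_int board_to_int board_to_int_alt
  rw [nestedA_eq_flat, nestedB_eq_flat, flat_fold_eq]
  ring
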